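-- pv_equiv track=rewrite | github.com/shamira-venturini/Geometry-of-Syntax | scripts/Phase-1/1_audit_jabberwocky_lexicon.py | candidate_pool
-- ===== SOURCE A (Python) =====
-- from typing import Dict, Iterable, List, Optional, Sequence, Set, Tuple
--
-- def candidate_pool(word: str, english_words: Set[str], primelm_vocab: Set[str]) -> List[str]:
--     pool = set()
--     target_lengths = {len(word) - 2, len(word) - 1, len(word), len(word) + 1, len(word) + 2}
--     initial = word[:1]
--     for source in (english_words, primelm_vocab):
--         for candidate in source:
--             if len(candidate) in target_lengths and candidate[:1] == initial:
--                 pool.add(candidate)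
--     if not pool:
--         for source in (english_words, primelm_vocab):
--             for candidate in source:
--                 if len(candidate) in target_lengths:
--                     pool.add(candidate)
--     return sorted(pool)
-- ===== SOURCE B (Python) =====
-- def candidate_pool(word, english_words, primelm_vocab):
--     lo, hi = len(word) - 2, len(word) + 2
--     initial = word[:1]
--     strict, loose = [], []
--     for c in sorted(set().union(english_words, primelm_vocab)):
--         if lo <= len(c) <= hi:
--             loose.append(c)
--             if c[:1] == initial:
--                 strict.append(c)
--     return strict or loose
-- ===== Notes on version B (the rewrite author's own statement) =====
-- stated objective: alternative
-- what changed: A builds an unordered set by scanning both sources for strict matches, conditionally re-scans both for the length-only fallback, and finally sorts; B sorts the deduplicated combined vocab first, then makes one linear scan over the sorted list maintaining two already-sorted accumulators (strict and length-only), returning strict or the fallback with no final sort.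
import Mathlib
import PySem

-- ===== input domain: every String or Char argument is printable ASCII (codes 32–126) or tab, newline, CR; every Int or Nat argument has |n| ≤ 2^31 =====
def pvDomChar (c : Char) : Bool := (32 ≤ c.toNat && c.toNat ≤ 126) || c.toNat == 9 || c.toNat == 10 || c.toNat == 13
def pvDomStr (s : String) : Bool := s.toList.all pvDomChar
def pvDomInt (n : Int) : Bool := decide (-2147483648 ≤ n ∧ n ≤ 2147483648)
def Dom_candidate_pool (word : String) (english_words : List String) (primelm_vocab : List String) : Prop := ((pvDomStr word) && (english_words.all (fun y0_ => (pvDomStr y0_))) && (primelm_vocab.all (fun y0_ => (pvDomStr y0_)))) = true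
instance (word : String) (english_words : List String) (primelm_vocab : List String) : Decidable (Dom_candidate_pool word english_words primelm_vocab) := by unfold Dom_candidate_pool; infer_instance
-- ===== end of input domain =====

-- B replaces A's "unordered-set scans, conditional fallback re-scan, final sort" by
-- sort-the-deduped-vocab-first, then one linear scan keeping two already-sorted lists
-- (strict and length-only) and returning one of them, with no final sort (objective: alternative).

-- ===== PORT A =====
-- Python A: pool = set(); the two nested 'for source in (english_words, primelm_vocab): for candidate in source'
-- loops are one fold over the concatenation; word[:1]/candidate[:1] is 'take 1' on the char list (exact for slices [:1]).
def candidate_pool (word : String) (english_words : List String) (primelm_vocab : List String) : List String :=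
  let n := PySem.Str.len word
  let target_lengths : PySem.Set Int := PySem.Set.ofList [n - 2, n - 1, n, n + 1, n + 2]
  let initial := word.toList.take 1
  let pool : PySem.Set String :=
    (english_words ++ primelm_vocab).foldl
      (fun s c => if PySem.Set.contains target_lengths (PySem.Str.len c) && (c.toList.take 1 == initial)
                  then PySem.Set.add s c else s)
      PySem.Set.empty
  let pool : PySem.Set String :=
    if pool = [] then
      (english_words ++ primelm_vocab).foldl
        (fun s c => if PySem.Set.contains target_lengths (PySem.Str.len c)
                    then PySem.Set.add s c else s)
        pool
    else pool
  PySem.List.sorted pool (fun x => x) false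

-- ===== PORT B =====
-- Python B: 'sorted(set().union(english_words, primelm_vocab))' = sorted over the insertion-order
-- dedup of the concatenation; the loop appends to the two list accumulators (strict, loose).
def candidate_pool_alt (word : String) (english_words : List String) (primelm_vocab : List String) : List String :=
  let lo := PySem.Str.len word - 2
  let hi := PySem.Str.len word + 2
  let initial := word.toList.take 1
  let acc :=
    (PySem.List.sorted (PySem.Set.ofList (english_words ++ primelm_vocab)) (fun x => x) false).foldl
      (fun (sl : List String × List String) c =>
        if decide (lo ≤ PySem.Str.len c) && decide (PySem.Str.len c ≤ hi) then
          if c.toList.take 1 == initial then (sl.1 ++ [c], sl.2 ++ [c])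
          else (sl.1, sl.2 ++ [c])
        else sl)
      ([], [])
  if acc.1 = [] then acc.2 else acc.1

-- ===== PRECONDITION & SPEC =====
def Spec_candidate_pool (word : String) (english_words : List String) (primelm_vocab : List String) (out : List String) : Prop := out = candidate_pool_alt word english_words primelm_vocab
instance (word : String) (english_words : List String) (primelm_vocab : List String) (out : List String) : Decidable (Spec_candidate_pool word english_words primelm_vocab out) := by unfold Spec_candidate_pool; infer_instance

-- ===== CLAIM =====
def Claim_equal_candidate_pool : Prop := ∀ (word : String) (english_words : List String) (primelm_vocab : List String), Dom_candidate_pool word english_words primelm_vocab → Spec_candidate_pool word english_words primelm_vocab (candidate_pool word english_words primelm_vocab)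

-- ===== LEMMAS AND PROOFS =====

-- {len(word)-2, …, len(word)+2} membership IS the two inequalities.
theorem contains_window (n x : Int) :
    PySem.Set.contains (PySem.Set.ofList [n - 2, n - 1, n, n + 1, n + 2]) x
      = (decide (n - 2 ≤ x) && decide (x ≤ n + 2)) := by
  rw [Bool.eq_iff_iff, PySem.Set.contains_iff, PySem.Set.mem_ofList]
  simp only [Bool.and_eq_true, decide_eq_true_eq, List.mem_cons, List.not_mem_nil, or_false]
  omega

-- sorting the dedup of a filtered list = filtering the sorted dedup of the list.
theorem sorted_ofList_filter (L : List String) (P : String → Bool) :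
    PySem.List.sorted (PySem.Set.ofList (L.filter P)) (fun x => x) false
      = (PySem.List.sorted (PySem.Set.ofList L) (fun x => x) false).filter P := by
  apply PySem.List.sorted_eq_of_perm_of_pairwise_lt
  · apply (List.perm_ext_iff_of_nodup ?_ (PySem.Set.nodup_ofList _)).2
    · intro x
      simp [List.mem_filter, PySem.List.mem_sorted, PySem.Set.mem_ofList, and_comm]
    · exact ((PySem.List.sorted_perm _ _ _).nodup_iff.2 (PySem.Set.nodup_ofList _)).filter _
  · exact (PySem.List.sorted_ofList_pairwise_lt _).filter _

theorem candidate_pool_spec : Claim_equal_candidate_pool := by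
  intro word e p _
  unfold Spec_candidate_pool candidate_pool candidate_pool_alt
  set n := PySem.Str.len word with hn
  set initial := word.toList.take 1 with hinit
  set L := e ++ p with hL
  set lenP : String → Bool := fun c => decide (n - 2 ≤ PySem.Str.len c) && decide (PySem.Str.len c ≤ n + 2) with hlenP
  set initP : String → Bool := fun c => c.toList.take 1 == initial with hinitP
  set S := PySem.List.sorted (PySem.Set.ofList L) (fun x => x) false with hS
  -- A's two loops are dedups of filters of L
  have hA1 : L.foldl
      (fun s c => if PySem.Set.contains (PySem.Set.ofList [n-2, n-1, n, n+1, n+2]) (PySem.Str.len c) && (c.toList.take 1 == initial)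
                  then PySem.Set.add s c else s) PySem.Set.empty
      = PySem.Set.ofList (L.filter (fun c => lenP c && initP c)) := by
    rw [PySem.List.foldl_congr_mem _ _ _ _ (fun acc x _ => by rw [contains_window]),
        PySem.List.foldl_if_eq_foldl_filter, PySem.Set.ofList_eq_foldl]
    rfl
  have hA2 : L.foldl
      (fun s c => if PySem.Set.contains (PySem.Set.ofList [n-2, n-1, n, n+1, n+2]) (PySem.Str.len c)
                  then PySem.Set.add s c else s) ([] : PySem.Set String)
      = PySem.Set.ofList (L.filter lenP) := by
    rw [PySem.List.foldl_congr_mem _ _ _ _ (fun acc x _ => by rw [contains_window]),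
        PySem.List.foldl_if_eq_foldl_filter, PySem.Set.ofList_eq_foldl]
  -- B's loop with its pair accumulator is two independent filter loops over S
  have hB : S.foldl
      (fun (sl : List String × List String) c =>
        if decide (n - 2 ≤ PySem.Str.len c) && decide (PySem.Str.len c ≤ n + 2) then
          if c.toList.take 1 == initial then (sl.1 ++ [c], sl.2 ++ [c]) else (sl.1, sl.2 ++ [c])
        else sl)
      (([], []) : List String × List String)
      = (S.filter (fun c => lenP c && initP c), S.filter lenP) := by
    rw [PySem.List.foldl_congr_mem
          (g := fun (sl : List String × List String) c =>
            (if lenP c && initP c then sl.1 ++ [c] else sl.1,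
             if lenP c then sl.2 ++ [c] else sl.2))
          _ _ _ (fun acc x _ => by
            by_cases h1 : n ≤ (x.length : Int) + 2 ∧ (x.length : Int) ≤ n + 2 <;>
              by_cases h2 : x.toList.take 1 = initial <;>
              simp [hlenP, hinitP, h1, h2]),
        PySem.List.foldl_prod_mk
          (f := fun acc c => if lenP c && initP c then acc ++ [c] else acc)
          (g := fun acc c => if lenP c then acc ++ [c] else acc),
        PySem.List.foldl_append_if_eq_filter, PySem.List.foldl_append_if_eq_filter]
    simp
  have hfil : ∀ P : String → Bool,
      PySem.List.sorted (PySem.Set.ofList (L.filter P)) (fun x => x) false = S.filter P :=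
    fun P => sorted_ofList_filter L P
  simp only [hA1]
  rw [hB]
  dsimp only
  by_cases hc : PySem.Set.ofList (L.filter (fun c => lenP c && initP c)) = ([] : List String)
  · have hS1 : S.filter (fun c => lenP c && initP c) = [] := by
      rw [← hfil, hc]; exact (PySem.List.sorted_eq_nil_iff _ _ _).2 rfl
    rw [if_pos hc, hc, hA2, if_pos hS1]
    exact hfil _
  · have hS1 : S.filter (fun c => lenP c && initP c) ≠ [] :=
      fun h => hc ((PySem.List.sorted_eq_nil_iff _ _ _).1 ((hfil _).trans h))
    rw [if_neg hc, if_neg hS1]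
    exact hfil _
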